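-- pv_equiv track=rewrite | github.com/rachidiID/Config_R-seau | reseau-partage/shared/utils.py | validate_filename
-- ===== SOURCE A (Python) =====
-- def validate_filename(filename: str) -> bool:
--     """
--     Valider un nom de fichier
--
--     Args:
--         filename: Nom du fichier
--
--     Returns:
--         True si valide, False sinon
--     """
--     # Caractères interdits
--     forbidden = ['/', '\\', ':', '*', '?', '"', '<', '>', '|']
--
--     if not filename or len(filename) > 255:
--         return False
--
--     for char in forbidden:
--         if char in filename:
--             return False
--
--     return True
-- ===== SOURCE B (Python) =====
-- def validate_filename(filename: str) -> bool:
--     """Single pass over the filename with a frozenset of forbidden characters."""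
--     if not filename or len(filename) > 255:
--         return False
--     forbidden = frozenset('/\\:*?"<>|')
--     return all(c not in forbidden for c in filename)
-- ===== Notes on version B (the rewrite author's own statement) =====
-- stated objective: idiomatic
-- what changed: Replaces nine substring scans of the filename (one per forbidden character) with a single pass over the filename's characters testing membership in a frozenset of forbidden characters.
import Mathlib
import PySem

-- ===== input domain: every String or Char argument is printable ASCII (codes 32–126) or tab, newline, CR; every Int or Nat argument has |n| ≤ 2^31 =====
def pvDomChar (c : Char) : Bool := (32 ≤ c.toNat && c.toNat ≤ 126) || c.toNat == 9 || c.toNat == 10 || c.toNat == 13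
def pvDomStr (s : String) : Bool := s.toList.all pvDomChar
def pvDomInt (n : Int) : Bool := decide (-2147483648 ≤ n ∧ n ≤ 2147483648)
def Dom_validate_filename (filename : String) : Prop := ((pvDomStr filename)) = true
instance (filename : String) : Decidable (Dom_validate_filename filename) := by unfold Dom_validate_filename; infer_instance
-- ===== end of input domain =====

-- B replaces A's nine substring scans by one pass over the filename with a set of forbidden characters (idiomatic; return value only).

-- ===== PORT A =====
-- A's 'for char in forbidden: if char in filename: return False'
def validate_filename_loopA (filename : String) : List String → Bool
  | [] => true
  | ch :: rest =>
    if PySem.Str.isIn ch filename then false else validate_filename_loopA filename rest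

def validate_filename (filename : String) : Bool :=
  let forbidden := ["/", "\\", ":", "*", "?", "\"", "<", ">", "|"]
  if filename.toList.isEmpty || PySem.Str.len filename > 255 then false
  else validate_filename_loopA filename forbidden

-- ===== PORT B =====
def validate_filename_forbiddenSet : PySem.Set Char :=
  PySem.Set.ofList "/\\:*?\"<>|".toList

def validate_filename_alt (filename : String) : Bool :=
  if filename.toList.isEmpty || PySem.Str.len filename > 255 then false
  else filename.toList.all (fun c => !(PySem.Set.contains validate_filename_forbiddenSet c))

-- ===== PRECONDITION & SPEC =====
def Spec_validate_filename (filename : String) (out : Bool) : Prop := out = validate_filename_alt filename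
instance (filename : String) (out : Bool) : Decidable (Spec_validate_filename filename out) := by unfold Spec_validate_filename; infer_instance

-- ===== CLAIM (what is proved, stated in full; the proofs are below) =====
def Claim_equal_validate_filename : Prop := ∀ (filename : String), Dom_validate_filename filename → Spec_validate_filename filename (validate_filename filename)

-- ===== LEMMAS AND PROOFS =====

theorem singleton_infix_iff_mem {c : Char} {l : List Char} : [c] <:+: l ↔ c ∈ l := by
  constructor
  · intro h
    exact (List.singleton_sublist).mp h.sublist
  · intro h
    obtain ⟨s, t, rfl⟩ := List.append_of_mem h
    exact ⟨s, t, by simp⟩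

theorem loopA_true_iff (filename : String) (l : List String) :
    validate_filename_loopA filename l = true ↔
      ∀ s ∈ l, ¬ s.toList <:+: filename.toList := by
  induction l with
  | nil => simp [validate_filename_loopA]
  | cons ch rest ih =>
    simp only [validate_filename_loopA]
    split_ifs with h
    · simp only [false_iff]
      intro hall
      exact hall ch (List.mem_cons_self ..) ((PySem.Str.isIn_iff_infix _ _).mp h)
    · rw [ih]
      constructor
      · intro hall s hs
        rcases List.mem_cons.mp hs with rfl | hs
        · intro hinf
          exact h ((PySem.Str.isIn_iff_infix _ _).mpr hinf)
        · exact hall s hs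
      · intro hall s hs
        exact hall s (List.mem_cons_of_mem _ hs)

theorem validate_filename_eq (filename : String) :
    validate_filename filename = validate_filename_alt filename := by
  unfold validate_filename validate_filename_alt
  split_ifs with h
  · rfl
  · rw [Bool.eq_iff_iff, loopA_true_iff, List.all_eq_true]
    have swap : (∀ c ∈ filename.toList, c ∉ "/\\:*?\"<>|".toList) ↔
        (∀ c ∈ "/\\:*?\"<>|".toList, c ∉ filename.toList) :=
      ⟨fun hh c hc hl => hh _ hl hc, fun hh c hc hf => hh _ hf hc⟩
    have rhs : (∀ c ∈ filename.toList,
          (!(PySem.Set.contains validate_filename_forbiddenSet c)) = true) ↔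
        (∀ c ∈ filename.toList, c ∉ "/\\:*?\"<>|".toList) := by
      refine forall₂_congr fun c _ => ?_
      simp [validate_filename_forbiddenSet, PySem.Set.mem_ofList]
    rw [rhs, swap]
    simp only [show ("/\\:*?\"<>|".toList) = ['/', '\\', ':', '*', '?', '"', '<', '>', '|'] from rfl,
      List.forall_mem_cons,
      show ("/" : String).toList = ['/'] from rfl, show ("\\" : String).toList = ['\\'] from rfl,
      show (":" : String).toList = [':'] from rfl, show ("*" : String).toList = ['*'] from rfl,
      show ("?" : String).toList = ['?'] from rfl, show ("\"" : String).toList = ['"'] from rfl,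
      show ("<" : String).toList = ['<'] from rfl, show (">" : String).toList = ['>'] from rfl,
      show ("|" : String).toList = ['|'] from rfl, singleton_infix_iff_mem]
    simp

-- ===== VERDICT (by name: the statement is the Claim_ definition above) =====
theorem validate_filename_spec : Claim_equal_validate_filename := by
  intro filename _
  exact validate_filename_eq filename
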